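-- pv_equiv track=rewrite | github.com/ajyoon/here_the_leafsighaway | lily/note.py | extend_pitches_through_range
-- ===== SOURCE A (Python) =====
-- def find_pitch_class(pitch):
--     """
--     Finds the 0-11 pitch class of any pitch
--     :param pitch: int
--     :return:int pitch class of 0-11
--     """
--     if pitch <= 0:
--         direction = 1
--     else:
--         direction = -1
--     while not (0 <= pitch <= 11):
--         pitch += direction * 12
--     return pitch
--
-- def extend_pitches_through_range(pitch_class_list, lowest, highest):
--     """
--     Takes a list of pitch classes (int's between 0 and 11) and transposes and extends it through the window given
--     :param pitch_class_list: list of int's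
--     :param min: int
--     :param max: int
--     :return: extended list
--     """
--     assert isinstance(pitch_class_list, list)
--     full_range = list(range(lowest, highest))
--     return_list = []
--     for pitch in full_range:
--         if find_pitch_class(pitch) in pitch_class_list:
--             return_list.append(pitch)
--     return return_list
-- ===== SOURCE B (Python) =====
-- def extend_pitches_through_range(pitch_class_list, lowest, highest):
--     assert isinstance(pitch_class_list, list)
--     result = []
--     for pc in set(pitch_class_list):
--         if 0 <= pc <= 11:
--             start = lowest + ((pc - lowest) % 12)
--             result.extend(range(start, highest, 12))
--     return sorted(result)
-- ===== Notes on version B (the rewrite author's own statement) =====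
-- stated objective: alternative
-- what changed: Instead of scanning every integer in range(lowest, highest) and normalizing it to its pitch class for a list membership test, B iterates over the deduplicated pitch classes (kept only if within 0..11), generates each one's arithmetic progression range(lowest + (pc - lowest) % 12, highest, 12) directly, and sorts the union; this trades A's per-integer membership scan for per-class generation plus a final sort.
import Mathlib
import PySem

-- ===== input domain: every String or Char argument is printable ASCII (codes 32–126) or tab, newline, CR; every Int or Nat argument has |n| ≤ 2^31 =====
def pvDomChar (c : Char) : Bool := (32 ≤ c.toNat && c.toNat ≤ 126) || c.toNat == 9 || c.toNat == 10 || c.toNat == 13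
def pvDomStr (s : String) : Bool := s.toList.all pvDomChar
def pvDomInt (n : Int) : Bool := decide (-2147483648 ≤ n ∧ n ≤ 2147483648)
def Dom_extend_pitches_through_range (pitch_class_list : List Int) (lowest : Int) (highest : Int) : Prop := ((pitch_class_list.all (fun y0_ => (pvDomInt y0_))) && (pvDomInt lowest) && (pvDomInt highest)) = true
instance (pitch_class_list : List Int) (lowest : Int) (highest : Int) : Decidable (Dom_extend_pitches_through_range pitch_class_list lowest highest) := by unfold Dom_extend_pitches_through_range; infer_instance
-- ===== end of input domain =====

-- B replaces A's per-integer scan of range(lowest, highest) by generating each pitch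
-- class's arithmetic progression directly and sorting the union (objective: alternative).

-- ===== PORT A =====
-- while loop of find_pitch_class, with fuel only to make it total (fuel never runs out on the calls made)
def fpcLoop : Nat → Int → Int → Int
  | 0, _, pitch => pitch
  | fuel+1, direction, pitch =>
    if 0 ≤ pitch ∧ pitch ≤ 11 then pitch
    else fpcLoop fuel direction (pitch + direction * 12)

def find_pitch_class (pitch : Int) : Int :=
  let direction : Int := if pitch ≤ 0 then 1 else -1
  fpcLoop (pitch.natAbs + 1) direction pitch

def extend_pitches_through_range (pitch_class_list : List Int) (lowest : Int) (highest : Int) : List Int :=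
  let full_range := PySem.List.pyRange lowest highest 1
  full_range.foldl (fun return_list pitch =>
    if find_pitch_class pitch ∈ pitch_class_list then return_list ++ [pitch] else return_list) []

-- ===== PORT B =====
def extend_pitches_through_range_alt (pitch_class_list : List Int) (lowest : Int) (highest : Int) : List Int :=
  let result := (PySem.Set.ofList pitch_class_list).foldl (fun result pc =>
    if 0 ≤ pc ∧ pc ≤ 11 then
      result ++ PySem.List.pyRange (lowest + PySem.Int.mod (pc - lowest) 12) highest 12
    else result) []
  PySem.List.sorted result (fun x => x)

-- ===== PRECONDITION & SPEC =====
def Spec_extend_pitches_through_range (pitch_class_list : List Int) (lowest : Int) (highest : Int) (out : List Int) : Prop := out = extend_pitches_through_range_alt pitch_class_list lowest highest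
instance (pitch_class_list : List Int) (lowest : Int) (highest : Int) (out : List Int) : Decidable (Spec_extend_pitches_through_range pitch_class_list lowest highest out) := by unfold Spec_extend_pitches_through_range; infer_instance

-- ===== CLAIM (what is proved, stated in full; the proofs are below) =====
def Claim_equal_extend_pitches_through_range : Prop := ∀ (pitch_class_list : List Int) (lowest : Int) (highest : Int), Dom_extend_pitches_through_range pitch_class_list lowest highest → Spec_extend_pitches_through_range pitch_class_list lowest highest (extend_pitches_through_range pitch_class_list lowest highest)

-- ===== LEMMAS AND PROOFS =====

-- find_pitch_class computes the Python-style residue mod 12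
lemma fpcLoop_up (n : Nat) : ∀ (p : Int), p ≤ 11 → -(12 * (n : Int)) ≤ p → fpcLoop n 1 p = p % 12 := by
  induction n with
  | zero => intro p h1 h2; simp [fpcLoop]; omega
  | succ n ih =>
    intro p h1 h2
    by_cases h : 0 ≤ p ∧ p ≤ 11
    · simp [fpcLoop, h]; omega
    · have hp : p < 0 := by omega
      simp only [fpcLoop, if_neg h]
      have := ih (p + 1 * 12) (by omega) (by push_cast; omega)
      rw [this]; omega

lemma fpcLoop_down (n : Nat) : ∀ (p : Int), 0 ≤ p → p ≤ 12 * (n : Int) + 11 → fpcLoop n (-1) p = p % 12 := by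
  induction n with
  | zero => intro p h1 h2; simp [fpcLoop]; omega
  | succ n ih =>
    intro p h1 h2
    by_cases h : 0 ≤ p ∧ p ≤ 11
    · simp [fpcLoop, h]; omega
    · have hp : 11 < p := by omega
      simp only [fpcLoop, if_neg h]
      have := ih (p + (-1) * 12) (by omega) (by push_cast at h2 ⊢; omega)
      rw [this]; omega

lemma find_pitch_class_eq_mod (p : Int) : find_pitch_class p = p % 12 := by
  unfold find_pitch_class
  by_cases hp : p ≤ 0
  · simp only [if_pos hp]
    exact fpcLoop_up (p.natAbs + 1) p (by omega) (by omega)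
  · simp only [if_neg hp]
    exact fpcLoop_down (p.natAbs + 1) p (by omega) (by omega)

-- the per-class progression B generates
def pvProg (lowest highest pc : Int) : List Int :=
  if 0 ≤ pc ∧ pc ≤ 11 then PySem.List.pyRange (lowest + (pc - lowest) % 12) highest 12 else []

lemma mem_pvProg (lowest highest pc x : Int) :
    x ∈ pvProg lowest highest pc ↔ 0 ≤ pc ∧ pc ≤ 11 ∧ lowest ≤ x ∧ x < highest ∧ x % 12 = pc := by
  unfold pvProg
  split
  · rename_i h
    rw [PySem.List.mem_pyRange_iff_of_pos (by norm_num)]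
    constructor
    · rintro ⟨h1, h2, h3⟩; obtain ⟨k, hk⟩ := h3; refine ⟨h.1, h.2, by omega, h2, by omega⟩
    · rintro ⟨_, _, h3, h4, h5⟩
      refine ⟨by omega, h4, ?_⟩
      have : (12:Int) ∣ x - (lowest + (pc - lowest) % 12) := by omega
      exact this
  · rename_i h; simp; intro _ _ _ _ h5; omega

lemma nodup_pvProg (lowest highest pc : Int) : (pvProg lowest highest pc).Nodup := by
  unfold pvProg
  split
  · rw [PySem.List.pyRange_of_pos _ _ (by norm_num : (0:Int) < 12)]
    exact (List.nodup_range).map (fun a b hab => by omega)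
  · exact List.nodup_nil

-- B unfolded to sorted(flatMap)
lemma alt_eq_sorted_flatMap (l : List Int) (lowest highest : Int) :
    extend_pitches_through_range_alt l lowest highest =
      PySem.List.sorted ((PySem.Set.ofList l).flatMap (pvProg lowest highest)) (fun x => x) := by
  unfold extend_pitches_through_range_alt
  have hfun : (fun (result : List Int) (pc : Int) =>
      if 0 ≤ pc ∧ pc ≤ 11 then
        result ++ PySem.List.pyRange (lowest + PySem.Int.mod (pc - lowest) 12) highest 12
      else result) = fun result pc => result ++ pvProg lowest highest pc := by
    funext result pc
    unfold pvProg
    rw [PySem.Int.mod_eq_emod_of_pos (by norm_num)]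
    split <;> simp
  rw [hfun, PySem.List.foldl_append_eq_flatMap]
  simp

-- A unfolded to a filter of the full range
lemma a_eq_filter (l : List Int) (lowest highest : Int) :
    extend_pitches_through_range l lowest highest =
      (PySem.List.pyRange lowest highest 1).filter (fun x => decide (x % 12 ∈ l)) := by
  unfold extend_pitches_through_range
  simp only []
  rw [show (fun (return_list : List Int) (pitch : Int) =>
      if find_pitch_class pitch ∈ l then return_list ++ [pitch] else return_list)
    = fun return_list pitch => if decide (pitch % 12 ∈ l) = true then return_list ++ [pitch] else return_list by
    funext acc pitch; rw [find_pitch_class_eq_mod]; simp]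
  rw [PySem.List.foldl_append_if_eq_filter]
  simp

lemma flatMap_nodup (l : List Int) (lowest highest : Int) :
    ((PySem.Set.ofList l).flatMap (pvProg lowest highest)).Nodup := by
  rw [List.nodup_flatMap]
  refine ⟨fun pc _ => nodup_pvProg lowest highest pc, ?_⟩
  refine (PySem.Set.nodup_ofList l).imp ?_
  intro a b hab x hxa hxb
  rw [mem_pvProg] at hxa hxb
  exact hab (by omega)

lemma mem_flatMap_iff (l : List Int) (lowest highest x : Int) :
    x ∈ (PySem.Set.ofList l).flatMap (pvProg lowest highest) ↔
      lowest ≤ x ∧ x < highest ∧ x % 12 ∈ l := by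
  rw [List.mem_flatMap]
  constructor
  · rintro ⟨pc, hpc, hx⟩
    rw [mem_pvProg] at hx
    rw [PySem.Set.mem_ofList] at hpc
    refine ⟨hx.2.2.1, hx.2.2.2.1, ?_⟩
    rw [hx.2.2.2.2]; exact hpc
  · rintro ⟨h1, h2, h3⟩
    refine ⟨x % 12, (PySem.Set.mem_ofList l _).2 h3, ?_⟩
    rw [mem_pvProg]
    exact ⟨by omega, by omega, h1, h2, rfl⟩

-- ===== VERDICT (by name: the statement is the Claim_ definition above) =====
theorem extend_pitches_through_range_spec : Claim_equal_extend_pitches_through_range := by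
  intro l lowest highest _hdom
  unfold Spec_extend_pitches_through_range
  rw [a_eq_filter, alt_eq_sorted_flatMap]
  refine (PySem.List.sorted_eq_of_perm_of_pairwise_lt _ _ _ ?_ ?_).symm
  · rw [List.perm_ext_iff_of_nodup ((PySem.List.nodup_pyRange_one lowest highest).filter _)
      (flatMap_nodup l lowest highest)]
    intro x
    rw [List.mem_filter, PySem.List.mem_pyRange_one, mem_flatMap_iff]
    simp; tauto
  · exact (PySem.List.pairwise_lt_pyRange_one lowest highest).filter _
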